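-- pv_equiv track=rewrite | github.com/linliyong/check_reduction | compute_reduction.py | distin
-- ===== SOURCE A (Python) =====
-- def inclusion(sub1, sub2):
--     for i in range(0, len(sub1)):
--         if not(sub1[i] in sub2):
--             return 0
--     return 1
--
-- def check_depend(sub, distr):
--     flag=0
--     for i in range(0, len(distr)):
--         if inclusion(sub,distr[i]):
--             flag=1
--             break
--     return flag
--
-- def check_small(distr1, distr2):
--     distr1new=distr1
--     flag=1
--     while len(distr1new)>0:
--         if not(check_depend(distr1new[0],distr2)):
--             flag=0
--             break
--         distr1new=distr1new[1:]
--     return flag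
--
-- def check_equal(distr1, distr2):
--     return check_small(distr1, distr2) and check_small(distr2, distr1)
--
-- def inset(distr,distrset):
--     for i in range(0, len(distrset)):
--         if check_equal(distr, distrset[i]):
--             return 1
--     return 0
--
-- def distin(distrset1, distrset2):
--     distrset1new=distrset1
--     p=[]
--     while (len(distrset1new)>0):
--         if not(inset(distrset1new[0],distrset2+p)):
--             p=p+[distrset1new[0]]
--         else:
--             distrset1new=distrset1new[1:]
--     return p
-- ===== SOURCE B (Python) =====
-- def distin(distrset1, distrset2):
--     # Canonicalize each distr to the sorted tuple of its maximal subsets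
--     # (as sorted tuples); mutual domination holds iff canonical forms are
--     # equal, so dedup is one hash-set pass instead of pairwise comparison.
--     def canon(d):
--         subs = [frozenset(s) for s in d]
--         maxi = {tuple(sorted(s)) for s in subs
--                 if not any(s < t for t in subs)}
--         return tuple(sorted(maxi))
--     seen = {canon(e) for e in distrset2}
--     p = []
--     for d in distrset1:
--         c = canon(d)
--         if c not in seen:
--             p.append(d)
--             seen.add(c)
--     return p
-- ===== Notes on version B (the rewrite author's own statement) =====
-- stated objective: faster
-- what changed: B canonicalizes each distr once to the sorted family of its maximal subsets (mutual domination holds iff the canonical forms are equal) and dedups with a single hash-set pass, instead of A's repeated pairwise check_equal comparisons of the head against distrset2+p inside a while loop.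
import Mathlib
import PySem

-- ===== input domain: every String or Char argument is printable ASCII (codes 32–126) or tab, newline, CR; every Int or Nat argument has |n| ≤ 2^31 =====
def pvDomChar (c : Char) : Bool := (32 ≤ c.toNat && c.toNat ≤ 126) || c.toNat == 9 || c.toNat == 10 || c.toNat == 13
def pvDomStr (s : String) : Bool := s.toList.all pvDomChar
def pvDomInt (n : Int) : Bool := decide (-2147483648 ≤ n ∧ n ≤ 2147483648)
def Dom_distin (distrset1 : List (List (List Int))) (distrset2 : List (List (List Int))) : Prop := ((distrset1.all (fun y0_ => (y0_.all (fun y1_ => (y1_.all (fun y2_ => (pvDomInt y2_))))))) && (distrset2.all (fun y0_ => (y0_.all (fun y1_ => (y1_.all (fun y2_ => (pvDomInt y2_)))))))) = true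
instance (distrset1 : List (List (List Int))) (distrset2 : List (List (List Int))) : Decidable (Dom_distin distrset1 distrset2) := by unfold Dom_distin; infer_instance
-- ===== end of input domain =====

-- B replaces A's pairwise mutual-domination comparisons by a canonical form
-- (the sorted family of maximal subsets) deduplicated through one hash set,
-- an asymptotically different one-pass algorithm with the same return value.

-- ===== PORT A =====
-- Literal port of Source A: ints 0/1 play Python's truthy role; every loop is the
-- obvious structural recursion over the same data with the same early exits.
def inclusion : List Int → List Int → Int
  | [], _ => 1
  | x :: xs, sub2 => if x ∈ sub2 then inclusion xs sub2 else 0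

def check_depend (sub : List Int) : List (List Int) → Int
  | [] => 0
  | d :: ds => if inclusion sub d ≠ 0 then 1 else check_depend sub ds

def check_small : List (List Int) → List (List Int) → Int
  | [], _ => 1
  | s :: rest, distr2 => if check_depend s distr2 = 0 then 0 else check_small rest distr2

-- Python's 'x and y' returns x when x is falsy, else y.
def check_equal (distr1 distr2 : List (List Int)) : Int :=
  if check_small distr1 distr2 = 0 then check_small distr1 distr2 else check_small distr2 distr1

def inset (distr : List (List Int)) : List (List (List Int)) → Int
  | [] => 0
  | e :: es => if check_equal distr e ≠ 0 then 1 else inset distr es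

-- Termination facts for A's while loop (cited in decreasing_by): once the head
-- has been appended to p it is 'inset' the next time around.
theorem inclusion_self_of_incl (s t : List Int) (h : ∀ x ∈ s, x ∈ t) : inclusion s t = 1 := by
  induction s with
  | nil => rfl
  | cons x xs ih =>
      have hx : x ∈ t := h x (by simp)
      simp only [inclusion, if_pos hx]
      exact ih (fun y hy => h y (by simp [hy]))

theorem check_depend_of_mem (s : List Int) (D : List (List Int)) (h : s ∈ D) :
    check_depend s D ≠ 0 := by
  induction D with
  | nil => simp at h
  | cons d ds ih =>
      by_cases hd : inclusion s d ≠ 0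
      · simp [check_depend, hd]
      · rcases List.mem_cons.mp h with h1 | h2
        · subst h1
          have := inclusion_self_of_incl s s (fun x hx => hx)
          omega
        · simp only [check_depend, if_neg hd]
          exact ih h2

theorem check_small_self (d : List (List Int)) : check_small d d ≠ 0 := by
  have : ∀ (a b : List (List Int)), (∀ s ∈ a, s ∈ b) → check_small a b ≠ 0 := by
    intro a
    induction a with
    | nil => intro b _; simp [check_small]
    | cons s rest ih =>
        intro b hb
        have hs : check_depend s b ≠ 0 := check_depend_of_mem s b (hb s (by simp))
        simp only [check_small, if_neg hs]
        exact ih b (fun u hu => hb u (by simp [hu]))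
  exact this d d (fun s hs => hs)

theorem check_equal_self (d : List (List Int)) : check_equal d d ≠ 0 := by
  have := check_small_self d
  simp [check_equal, this]

theorem inset_append_self (x : List (List Int)) (l : List (List (List Int))) :
    inset x (l ++ [x]) ≠ 0 := by
  induction l with
  | nil => simp [inset, check_equal_self x]
  | cons e es ih =>
      by_cases he : check_equal x e ≠ 0
      · simp [inset, he]
      · simpa [inset, he] using ih

-- Python distin's while loop: it APPENDS the head to p when it is new (without
-- consuming it) and only drops the head once it is found inset distrset2 + p.
def distinLoop (distrset2 : List (List (List Int))) :
    List (List (List Int)) → List (List (List Int)) → List (List (List Int))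
  | [], p => p
  | h :: t, p =>
      if inset h (distrset2 ++ p) = 0 then distinLoop distrset2 (h :: t) (p ++ [h])
      else distinLoop distrset2 t p
  termination_by rest p =>
    2 * rest.length +
      (match rest with
       | [] => 0
       | h :: _ => if inset h (distrset2 ++ p) = 0 then 1 else 0)
  decreasing_by
  · rename_i hz
    have hh : inset h (distrset2 ++ (p ++ [h])) ≠ 0 := by
      rw [← List.append_assoc]; exact inset_append_self h _
    rw [if_neg hh, if_pos hz]
    omega
  · rename_i hne
    rw [if_neg hne]
    cases t with
    | nil => simp
    | cons a b =>
        simp only [List.length_cons]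
        split <;> omega

def distin (distrset1 : List (List (List Int))) (distrset2 : List (List (List Int))) : List (List (List Int)) :=
  distinLoop distrset2 distrset1 []

-- ===== PORT B =====
-- Literal port of Source B.  A frozenset of ints is represented by its sorted
-- duplicate-free list (tuple(sorted(frozenset(s)))), so Python's strict subset
-- test 's < t' on frozensets is exactly strictSub on the normal forms, and
-- frozenset/tuple equality is plain list equality.
def strictSub (s t : List Int) : Bool := s != t && s.all (fun x => t.contains x)

-- tuple(sorted(frozenset(s)))
def normSub (s : List Int) : List Int :=
  PySem.List.sorted (PySem.Set.ofList s) (fun x => x) false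

-- the maximal subsets: {s for s in subs if not any(s < t for t in subs)}
def maxSubs (d : List (List Int)) : List (List Int) :=
  (d.map normSub).filter (fun s => !(d.map normSub).any (fun t => strictSub s t))

-- canon(d) = tuple(sorted({tuple(sorted(s)) for s in subs if not any(s < t for t in subs)}))
def canon (d : List (List Int)) : List (List Int) :=
  PySem.List.sorted (PySem.Set.ofList (maxSubs d)) (fun x => x) false

-- the 'for d in distrset1: … append …' loop with its seen-set accumulator
def bGo (seen : PySem.Set (List (List Int))) :
    List (List (List Int)) → List (List (List Int))
  | [] => []
  | d :: ds =>
      let c := canon d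
      if PySem.Set.contains seen c then bGo seen ds
      else d :: bGo (PySem.Set.add seen c) ds

def distin_alt (distrset1 : List (List (List Int))) (distrset2 : List (List (List Int))) : List (List (List Int)) :=
  bGo (PySem.Set.ofList (distrset2.map canon)) distrset1

-- ===== PRECONDITION & SPEC =====
def Spec_distin (distrset1 : List (List (List Int))) (distrset2 : List (List (List Int))) (out : List (List (List Int))) : Prop := out = distin_alt distrset1 distrset2
instance (distrset1 : List (List (List Int))) (distrset2 : List (List (List Int))) (out : List (List (List Int))) : Decidable (Spec_distin distrset1 distrset2 out) := by unfold Spec_distin; infer_instance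

-- ===== CLAIM (what is proved, stated in full; the proofs are below) =====
def Claim_equal_distin : Prop := ∀ (distrset1 : List (List (List Int))) (distrset2 : List (List (List Int))), Dom_distin distrset1 distrset2 → Spec_distin distrset1 distrset2 (distin distrset1 distrset2)

-- ===== LEMMAS AND PROOFS =====

-- inclusion as subset, domination, and A's flags as propositions
def incl (s t : List Int) : Prop := ∀ x ∈ s, x ∈ t

def domP (a b : List (List Int)) : Prop := ∀ s ∈ a, ∃ t ∈ b, incl s t

theorem inclusion_ne_zero_iff (s t : List Int) : inclusion s t ≠ 0 ↔ incl s t := by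
  induction s with
  | nil => simp [inclusion, incl]
  | cons x xs ih =>
      by_cases hx : x ∈ t
      · simp [inclusion, hx, incl] at ih ⊢
        exact ih
      · simp only [inclusion, if_neg hx]
        exact ⟨fun h => absurd rfl h, fun h => absurd (h x (by simp)) hx⟩

theorem check_depend_ne_zero_iff (s : List Int) (D : List (List Int)) :
    check_depend s D ≠ 0 ↔ ∃ t ∈ D, incl s t := by
  induction D with
  | nil => simp [check_depend]
  | cons d ds ih =>
      by_cases hd : inclusion s d ≠ 0
      · simp [check_depend, hd]
        exact Or.inl ((inclusion_ne_zero_iff s d).mp hd)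
      · have hni : ¬ incl s d := fun h => hd ((inclusion_ne_zero_iff s d).mpr h)
        simp [check_depend, hd, ih, hni]

theorem check_small_ne_zero_iff (a b : List (List Int)) :
    check_small a b ≠ 0 ↔ domP a b := by
  induction a with
  | nil => simp [check_small, domP]
  | cons s rest ih =>
      by_cases hs : check_depend s b = 0
      · have hnd : ¬ ∃ t ∈ b, incl s t := by
          intro h
          have := (check_depend_ne_zero_iff s b).mpr h
          omega
        simp only [check_small, if_pos hs, ne_eq, not_true_eq_false, false_iff]
        intro hdom
        exact hnd (hdom s (by simp))
      · have hex : ∃ t ∈ b, incl s t := (check_depend_ne_zero_iff s b).mp hs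
        simp only [check_small, if_neg hs, ih, domP, List.mem_cons]
        constructor
        · rintro h u (rfl | hu)
          · exact hex
          · exact h u hu
        · exact fun h u hu => h u (Or.inr hu)

theorem check_equal_ne_zero_iff (a b : List (List Int)) :
    check_equal a b ≠ 0 ↔ (domP a b ∧ domP b a) := by
  unfold check_equal
  by_cases h1 : check_small a b = 0
  · have : ¬ domP a b := fun h => (check_small_ne_zero_iff a b).mpr h h1
    simp [h1, this]
  · have hab : domP a b := (check_small_ne_zero_iff a b).mp h1
    simp [h1, hab, check_small_ne_zero_iff]

theorem inset_ne_zero_iff (x : List (List Int)) (D : List (List (List Int))) :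
    inset x D ≠ 0 ↔ ∃ e ∈ D, domP x e ∧ domP e x := by
  induction D with
  | nil => simp [inset]
  | cons e es ih =>
      by_cases he : check_equal x e ≠ 0
      · simp [inset, he]
        exact Or.inl ((check_equal_ne_zero_iff x e).mp he)
      · have hne : ¬ (domP x e ∧ domP e x) := fun h => he ((check_equal_ne_zero_iff x e).mpr h)
        simp [inset, he, ih, hne]

-- normal forms
theorem mem_normSub (s : List Int) (x : Int) : x ∈ normSub s ↔ x ∈ s := by
  simp [normSub, PySem.List.mem_sorted, PySem.Set.mem_ofList]

theorem normSub_eq_iff (a b : List Int) : normSub a = normSub b ↔ (∀ x, x ∈ a ↔ x ∈ b) := by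
  constructor
  · intro h x
    rw [← mem_normSub a x, h, mem_normSub]
  · intro h
    have hp : (PySem.Set.ofList a).Perm (PySem.Set.ofList b) :=
      (List.perm_ext_iff_of_nodup (PySem.Set.nodup_ofList a) (PySem.Set.nodup_ofList b)).mpr
        (by simpa [PySem.Set.mem_ofList] using h)
    exact PySem.List.sorted_eq_sorted_of_perm _ _ _ (fun x y hxy => hxy) hp

theorem strictSub_norm_iff (s t : List Int) :
    strictSub (normSub s) (normSub t) = true ↔ (incl s t ∧ ¬ incl t s) := by
  simp only [strictSub, Bool.and_eq_true, bne_iff_ne, ne_eq, List.all_eq_true,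
    List.contains_iff_mem]
  constructor
  · rintro ⟨hne, hall⟩
    have hst : incl s t := fun x hx => (mem_normSub t x).mp (hall x ((mem_normSub s x).mpr hx))
    refine ⟨hst, fun hts => hne ?_⟩
    exact (normSub_eq_iff s t).mpr (fun x => ⟨fun h => hst x h, fun h => hts x h⟩)
  · rintro ⟨hst, hts⟩
    refine ⟨fun he => hts ?_, fun x hx => (mem_normSub t x).mpr (hst x ((mem_normSub s x).mp hx))⟩
    intro x hx
    exact ((normSub_eq_iff s t).mp he x).mpr hx

def maximalIn (s : List Int) (d : List (List Int)) : Prop := ∀ t ∈ d, incl s t → incl t s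

theorem mem_maxSubs (d : List (List Int)) (u : List Int) :
    u ∈ maxSubs d ↔ (∃ s ∈ d, normSub s = u) ∧ ∀ t ∈ d, strictSub u (normSub t) = false := by
  simp only [maxSubs, List.mem_filter, List.mem_map, Bool.not_eq_eq_eq_not, Bool.not_true,
    List.any_eq_false]
  constructor
  · rintro ⟨⟨s, hs, rfl⟩, hall⟩
    exact ⟨⟨s, hs, rfl⟩, fun t ht => Bool.eq_false_iff.mpr (hall (normSub t) ⟨t, ht, rfl⟩)⟩
  · rintro ⟨⟨s, hs, rfl⟩, hall⟩
    refine ⟨⟨s, hs, rfl⟩, fun v hv => ?_⟩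
    obtain ⟨t, ht, rfl⟩ := hv
    exact Bool.eq_false_iff.mp (hall t ht)

theorem mem_canon (d : List (List Int)) (u : List Int) :
    u ∈ canon d ↔ ∃ s ∈ d, normSub s = u ∧ maximalIn s d := by
  rw [canon, PySem.List.mem_sorted, PySem.Set.mem_ofList, mem_maxSubs]
  constructor
  · rintro ⟨⟨s, hs, rfl⟩, hall⟩
    refine ⟨s, hs, rfl, fun t ht hst => ?_⟩
    by_contra hts
    exact absurd ((strictSub_norm_iff s t).mpr ⟨hst, hts⟩) (by simp [hall t ht])
  · rintro ⟨s, hs, rfl, hmax⟩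
    refine ⟨⟨s, hs, rfl⟩, fun t ht => Bool.eq_false_iff.mpr (fun hc => ?_)⟩
    rcases (strictSub_norm_iff s t).mp hc with ⟨hst, hts⟩
    exact hts (hmax t ht hst)

-- sorting a duplicate-free list of tuples is determined by its membership
theorem sortedL_eq_of_mem_iff (xs ys : List (List Int)) (hx : xs.Nodup) (hy : ys.Nodup)
    (h : ∀ u, u ∈ xs ↔ u ∈ ys) :
    PySem.List.sorted xs (fun x => x) false = PySem.List.sorted ys (fun x => x) false := by
  have hinst : (fun (a b : List Int) => a.decidableLT b) =
      @LinearOrder.toDecidableLT (List Int) inferInstance :=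
    funext fun a => funext fun b => Subsingleton.elim _ _
  have hperm : xs.Perm ys := (List.perm_ext_iff_of_nodup hx hy).mpr h
  show @PySem.List.sorted (List Int) (List Int) List.instLT (fun a b => a.decidableLT b)
      xs (fun x => x) false = @PySem.List.sorted (List Int) (List Int) List.instLT
      (fun a b => a.decidableLT b) ys (fun x => x) false
  rw [hinst]
  exact PySem.List.sorted_eq_sorted_of_perm xs ys (fun x => x) (fun x y hxy => hxy) hperm

theorem canon_eq_iff (a b : List (List Int)) :
    canon a = canon b ↔ (∀ u, u ∈ canon a ↔ u ∈ canon b) := by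
  constructor
  · intro h u; rw [h]
  · intro h
    unfold canon at h ⊢
    simp only [PySem.List.mem_sorted] at h
    exact sortedL_eq_of_mem_iff _ _ (PySem.Set.nodup_ofList _) (PySem.Set.nodup_ofList _) h

def inclB (s t : List Int) : Bool := s.all (fun x => t.contains x)

theorem inclB_iff (s t : List Int) : inclB s t = true ↔ incl s t := by
  simp [inclB, incl, List.all_eq_true]

theorem exists_maximal (d : List (List Int)) (s : List Int) (hs : s ∈ d) :
    ∃ m ∈ d, incl s m ∧ maximalIn m d := by
  have key : ∀ (n : Nat) (s : List Int), s ∈ d →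
      (d.filter (fun u => inclB s u)).length ≤ n →
      ∃ m ∈ d, incl s m ∧ maximalIn m d := by
    intro n
    induction n with
    | zero =>
        intro s hs hle
        exfalso
        have hm : s ∈ d.filter (fun u => inclB s u) :=
          List.mem_filter.mpr ⟨hs, (inclB_iff s s).mpr (fun x hx => hx)⟩
        have := List.length_pos_of_mem hm
        omega
    | succ n ih =>
        intro s hs hle
        by_cases hmax : maximalIn s d
        · exact ⟨s, hs, fun x hx => hx, hmax⟩
        · unfold maximalIn at hmax
          push Not at hmax
          obtain ⟨t, ht, hst, hts⟩ := hmax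
          have hsub : (d.filter (fun u => inclB t u)).Sublist
              (d.filter (fun u => inclB s u)) := by
            refine List.monotone_filter_right d (fun u hu => ?_)
            have htu : incl t u := (inclB_iff t u).mp hu
            exact (inclB_iff s u).mpr (fun x hx => htu x (hst x hx))
          have hlt : (d.filter (fun u => inclB t u)).length <
              (d.filter (fun u => inclB s u)).length := by
            rcases Nat.lt_or_ge (d.filter (fun u => inclB t u)).length
                (d.filter (fun u => inclB s u)).length with h | h
            · exact h
            · exfalso
              have heq := hsub.eq_of_length (Nat.le_antisymm hsub.length_le h)
              have hmem : s ∈ d.filter (fun u => inclB s u) :=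
                List.mem_filter.mpr ⟨hs, (inclB_iff s s).mpr (fun x hx => hx)⟩
              rw [← heq] at hmem
              exact hts ((inclB_iff t s).mp (List.mem_filter.mp hmem).2)
          obtain ⟨m, hm, htm, hmx⟩ := ih t ht (by omega)
          exact ⟨m, hm, fun x hx => htm x (hst x hx), hmx⟩
  exact key (d.filter (fun u => inclB s u)).length s hs le_rfl

theorem canon_subset_of_dom (a b : List (List Int)) (hab : domP a b) (hba : domP b a)
    (u : List Int) (hu : u ∈ canon a) : u ∈ canon b := by
  rcases (mem_canon a u).mp hu with ⟨s, hs, rfl, hmaxs⟩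
  obtain ⟨t, ht, hst⟩ := hab s hs
  obtain ⟨w, hw, htw⟩ := hba t ht
  have hsw : incl s w := fun x hx => htw x (hst x hx)
  have hws : incl w s := hmaxs w hw hsw
  have hts : incl t s := fun x hx => hws x (htw x hx)
  refine (mem_canon b (normSub s)).mpr ⟨t, ht, ?_, ?_⟩
  · exact (normSub_eq_iff t s).mpr (fun x => ⟨fun h => hts x h, fun h => hst x h⟩)
  · intro t' ht' htt'
    obtain ⟨w', hw', ht'w'⟩ := hba t' ht'
    have hsw' : incl s w' := fun x hx => ht'w' x (htt' x (hst x hx))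
    have hw's : incl w' s := hmaxs w' hw' hsw'
    intro x hx
    exact hst x (hw's x (ht'w' x hx))

theorem equiv_iff_canon (a b : List (List Int)) :
    (domP a b ∧ domP b a) ↔ canon a = canon b := by
  constructor
  · rintro ⟨hab, hba⟩
    rw [canon_eq_iff]
    exact fun u => ⟨canon_subset_of_dom a b hab hba u, canon_subset_of_dom b a hba hab u⟩
  · intro h
    constructor
    · intro s hs
      obtain ⟨m, hm, hsm, hmax⟩ := exists_maximal a s hs
      have : normSub m ∈ canon b := by
        rw [← h]
        exact (mem_canon a (normSub m)).mpr ⟨m, hm, rfl, hmax⟩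
      rcases (mem_canon b (normSub m)).mp this with ⟨t, ht, hnt, _⟩
      refine ⟨t, ht, fun x hx => ?_⟩
      exact ((normSub_eq_iff t m).mp hnt x).mpr (hsm x hx)
    · intro s hs
      obtain ⟨m, hm, hsm, hmax⟩ := exists_maximal b s hs
      have : normSub m ∈ canon a := by
        rw [h]
        exact (mem_canon b (normSub m)).mpr ⟨m, hm, rfl, hmax⟩
      rcases (mem_canon a (normSub m)).mp this with ⟨t, ht, hnt, _⟩
      refine ⟨t, ht, fun x hx => ?_⟩
      exact ((normSub_eq_iff t m).mp hnt x).mpr (hsm x hx)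

theorem inset_ne_zero_iff_canon (x : List (List Int)) (D : List (List (List Int))) :
    inset x D ≠ 0 ↔ canon x ∈ D.map canon := by
  rw [inset_ne_zero_iff]
  simp only [List.mem_map]
  constructor
  · rintro ⟨e, he, hx⟩
    exact ⟨e, he, ((equiv_iff_canon x e).mp hx).symm⟩
  · rintro ⟨e, he, hx⟩
    exact ⟨e, he, (equiv_iff_canon x e).mpr hx.symm⟩

-- loop correspondence
theorem bGo_congr (seen seen' : PySem.Set (List (List Int)))
    (h : ∀ c, c ∈ seen ↔ c ∈ seen') (rest : List (List (List Int))) :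
    bGo seen rest = bGo seen' rest := by
  induction rest generalizing seen seen' with
  | nil => rfl
  | cons d ds ih =>
      simp only [bGo]
      by_cases hc : canon d ∈ seen
      · rw [if_pos ((PySem.Set.contains_iff _ _).mpr hc),
          if_pos ((PySem.Set.contains_iff _ _).mpr ((h (canon d)).mp hc))]
        exact ih seen seen' h
      · rw [if_neg (fun hcc => hc ((PySem.Set.contains_iff _ _).mp hcc)),
          if_neg (fun hcc => hc ((h (canon d)).mpr ((PySem.Set.contains_iff _ _).mp hcc)))]
        refine congrArg _ (ih _ _ (fun c => ?_))
        simp only [PySem.Set.mem_add, h c]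

theorem mem_ofList_map_canon (l : List (List (List Int))) (c : List (List Int)) :
    c ∈ PySem.Set.ofList (l.map canon) ↔ c ∈ l.map canon :=
  PySem.Set.mem_ofList _ _

theorem distinLoop_eq (d2 : List (List (List Int))) (rest p : List (List (List Int))) :
    distinLoop d2 rest p = p ++ bGo (PySem.Set.ofList ((d2 ++ p).map canon)) rest := by
  induction rest, p using distinLoop.induct d2 with
  | case1 p => simp [distinLoop, bGo]
  | case2 h t p hz ih =>
      have hnot : canon h ∉ (d2 ++ p).map canon := by
        intro hmem
        have := (inset_ne_zero_iff_canon h (d2 ++ p)).mpr hmem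
        omega
      rw [distinLoop, if_pos hz, ih]
      conv_rhs =>
        rw [bGo, if_neg (fun hcc => hnot ((mem_ofList_map_canon _ _).mp
          ((PySem.Set.contains_iff _ _).mp hcc)))]
      rw [bGo, if_pos ((PySem.Set.contains_iff _ _).mpr ((mem_ofList_map_canon _ _).mpr (by
        rw [← List.append_assoc]; exact List.mem_map.mpr ⟨h, by simp, rfl⟩)))]
      rw [List.append_assoc, List.singleton_append]
      refine congrArg _ (congrArg _ (bGo_congr _ _ (fun c => ?_) t))
      simp only [PySem.Set.mem_add, PySem.Set.mem_ofList, List.map_append, List.mem_append,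
        List.map_cons, List.map_nil, List.mem_cons, List.not_mem_nil, or_false]
      tauto
  | case3 h t p hz ih =>
      have hmem : canon h ∈ (d2 ++ p).map canon :=
        (inset_ne_zero_iff_canon h (d2 ++ p)).mp hz
      rw [distinLoop, if_neg hz, ih, bGo,
        if_pos ((PySem.Set.contains_iff _ _).mpr ((mem_ofList_map_canon _ _).mpr hmem))]

-- ===== VERDICT (by name: the statement is the Claim_ definition above) =====
theorem distin_spec : Claim_equal_distin := by
  intro d1 d2 _
  show distin d1 d2 = distin_alt d1 d2
  have := distinLoop_eq d2 d1 []
  simpa [distin, distin_alt] using this
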